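-- pv_equiv track=rewrite | github.com/xiaoxue-ma/MDP | fsm/test.py | combine_move_forawrd
-- ===== SOURCE A (Python) =====
-- M_MOVE_FORWARD = "mf"
--
-- def combine_move_forawrd(ls):
--     "combine the mf messages into mf*<num>"
--     result_ls = []
--     accumlation = 0
--     for i in range(len(ls)):
--         if (ls[i]==M_MOVE_FORWARD):
--             accumlation += 1
--         else:
--             if (accumlation>0):
--                 result_ls.append("{}*{}".format(M_MOVE_FORWARD,accumlation)
--                                  if accumlation>1 else M_MOVE_FORWARD)
--             result_ls.append(ls[i])
--             accumlation = 0
--     if (accumlation>0):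
--         result_ls.append("{}*{}".format(M_MOVE_FORWARD,accumlation)
--                                  if accumlation>1 else M_MOVE_FORWARD)
--     return result_ls
-- ===== SOURCE B (Python) =====
-- from itertools import groupby
--
-- M_MOVE_FORWARD = "mf"
--
-- def combine_move_forawrd(ls):
--     "combine the mf messages into mf*<num>"
--     out = []
--     for key, grp in groupby(ls):
--         n = len(list(grp))
--         if key == M_MOVE_FORWARD:
--             out.append("{}*{}".format(M_MOVE_FORWARD, n) if n > 1 else M_MOVE_FORWARD)
--         else:
--             out.extend([key] * n)
--     return out
-- ===== Notes on version B (the rewrite author's own statement) =====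
-- stated objective: idiomatic
-- what changed: Replaces A's element-by-element pass with a running accumulator and two flush sites by itertools.groupby over maximal runs, emitting each run's output once.
import Mathlib
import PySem

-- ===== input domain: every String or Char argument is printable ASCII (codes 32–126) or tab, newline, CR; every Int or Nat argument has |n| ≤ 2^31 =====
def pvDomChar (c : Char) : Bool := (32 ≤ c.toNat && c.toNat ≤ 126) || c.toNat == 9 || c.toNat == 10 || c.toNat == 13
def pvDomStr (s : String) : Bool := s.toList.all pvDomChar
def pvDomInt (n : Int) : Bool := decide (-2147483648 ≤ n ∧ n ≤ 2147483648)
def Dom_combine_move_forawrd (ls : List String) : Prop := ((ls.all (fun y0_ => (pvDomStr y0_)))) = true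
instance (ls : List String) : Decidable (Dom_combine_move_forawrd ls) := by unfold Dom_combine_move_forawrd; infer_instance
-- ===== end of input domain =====

-- B replaces A's running-accumulator pass with a groupby-style recursion over maximal runs (idiomatic; same cost).


-- ===== PORT A =====
-- literal port: fold over the elements keeping (result_ls, accumlation), then final flush
def combine_move_forawrd (ls : List String) : List String :=
  let st := ls.foldl
    (fun (st : List String × Int) x =>
      if x == "mf" then (st.1, st.2 + 1)
      else
        let r := if st.2 > 0 then
            st.1 ++ [if st.2 > 1 then "mf" ++ "*" ++ PySem.Int.toStr st.2 else "mf"]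
          else st.1
        (r ++ [x], 0))
    ([], 0)
  if st.2 > 0 then
    st.1 ++ [if st.2 > 1 then "mf" ++ "*" ++ PySem.Int.toStr st.2 else "mf"]
  else st.1

-- ===== PORT B =====
-- port of Source B: peel off one maximal run of equal tokens at a time (groupby) and emit it once
def combine_move_forawrd_alt : List String → List String
  | [] => []
  | x :: xs =>
    let n : Nat := 1 + (xs.takeWhile (· == x)).length
    let emit := if x == "mf" then
        [if n > 1 then "mf" ++ "*" ++ PySem.Int.toStr (n : Int) else "mf"]
      else List.replicate n x
    emit ++ combine_move_forawrd_alt (xs.dropWhile (· == x))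
termination_by ls => ls.length
decreasing_by
  simp only [List.length_cons]
  exact Nat.lt_succ_of_le (List.length_dropWhile_le _ _)

-- ===== PRECONDITION & SPEC =====
def Spec_combine_move_forawrd (ls : List String) (out : List String) : Prop := out = combine_move_forawrd_alt ls
instance (ls : List String) (out : List String) : Decidable (Spec_combine_move_forawrd ls out) := by unfold Spec_combine_move_forawrd; infer_instance

-- ===== CLAIM (what is proved, stated in full; the proofs are below) =====
def Claim_equal_combine_move_forawrd : Prop := ∀ (ls : List String), Dom_combine_move_forawrd ls → Spec_combine_move_forawrd ls (combine_move_forawrd ls)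

-- ===== LEMMAS AND PROOFS =====

-- A's fold step and final flush, named for the proofs (definitionally the inline code of the port)
def pvStep (st : List String × Int) (x : String) : List String × Int :=
  if x == "mf" then (st.1, st.2 + 1)
  else
    let r := if st.2 > 0 then
        st.1 ++ [if st.2 > 1 then "mf" ++ "*" ++ PySem.Int.toStr st.2 else "mf"]
      else st.1
    (r ++ [x], 0)

def pvFin (st : List String × Int) : List String :=
  if st.2 > 0 then
    st.1 ++ [if st.2 > 1 then "mf" ++ "*" ++ PySem.Int.toStr st.2 else "mf"]
  else st.1

def pvFlush (a : Int) : List String :=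
  if a > 0 then [if a > 1 then "mf" ++ "*" ++ PySem.Int.toStr a else "mf"] else []

-- A's loop, rephrased as recursion on the list with the accumulator explicit
def pvA : Int → List String → List String
  | a, [] => pvFlush a
  | a, x :: xs => if x == "mf" then pvA (a + 1) xs else pvFlush a ++ [x] ++ pvA 0 xs

lemma pvA_eq (ls : List String) : ∀ (r : List String) (a : Int),
    pvFin (ls.foldl pvStep (r, a)) = r ++ pvA a ls := by
  induction ls with
  | nil => intro r a; simp [pvA, pvFin, pvFlush]; split_ifs <;> simp
  | cons x xs ih =>
    intro r a
    by_cases hx : x == "mf"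
    · simp only [List.foldl_cons, pvStep, hx, if_true, pvA]
      exact ih r (a + 1)
    · simp only [List.foldl_cons, pvStep, hx, Bool.false_eq_true, if_false, pvA, pvFlush]
      rw [ih _ 0]
      split_ifs <;> simp

-- a positive accumulator absorbs the leading run of "mf"s, then flushes once
lemma pvA_run (xs : List String) : ∀ (a : Int), 0 < a →
    pvA a xs = [if a + ((xs.takeWhile (· == "mf")).length : Int) > 1 then
        "mf" ++ "*" ++ PySem.Int.toStr (a + ((xs.takeWhile (· == "mf")).length : Int)) else "mf"]
      ++ pvA 0 (xs.dropWhile (· == "mf")) := by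
  induction xs with
  | nil => intro a ha; simp [pvA, pvFlush, ha]
  | cons x xs ih =>
    intro a ha
    by_cases hx : x == "mf"
    · have hxs : x = "mf" := by simpa using hx
      subst hxs
      simp only [pvA, List.takeWhile_cons, List.dropWhile_cons]
      simp only [show (("mf" : String) == "mf") = true from rfl, if_true, List.length_cons]
      rw [ih (a + 1) (by omega)]
      have he : a + (((xs.takeWhile (· == "mf")).length + 1 : Nat) : Int)
          = (a + 1) + ((xs.takeWhile (· == "mf")).length : Int) := by push_cast; ring
      rw [he]
    · simp only [pvA, hx, List.takeWhile_cons, List.dropWhile_cons, Bool.false_eq_true,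
        if_false, List.length_nil]
      simp [pvFlush, ha]

lemma pvA_zero_alt (ls : List String) : pvA 0 ls = combine_move_forawrd_alt ls := by
  induction hls : ls.length using Nat.strong_induction_on generalizing ls with
  | _ n ih =>
  cases ls with
  | nil => simp [pvA, pvFlush, combine_move_forawrd_alt]
  | cons x xs =>
    by_cases hx : x == "mf"
    · have hxs : x = "mf" := by simpa using hx
      subst hxs
      rw [combine_move_forawrd_alt]
      simp only [pvA, show (("mf" : String) == "mf") = true from rfl, if_true, zero_add]
      rw [pvA_run xs 1 one_pos]
      rw [ih (xs.dropWhile (· == "mf")).length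
            (by subst hls; simp only [List.length_cons]
                exact Nat.lt_succ_of_le (List.length_dropWhile_le _ _))
            _ rfl]
      congr 1
      push_cast
      split_ifs with h1 h2 <;> first | rfl | omega
    · rw [combine_move_forawrd_alt]
      simp only [pvA, hx, Bool.false_eq_true, if_false, pvFlush]
      rw [if_neg (by omega)]
      rw [ih xs.length (by subst hls; simp) _ rfl]
      -- B emits the whole run of x's at once; A emits x and recurses into the same run
      cases xs with
      | nil => simp [combine_move_forawrd_alt]
      | cons y ys =>
        by_cases hy : y == x
        · have hyx : y = x := by simpa using hy
          subst hyx
          rw [combine_move_forawrd_alt]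
          simp only [List.takeWhile_cons, List.dropWhile_cons, hy, if_true, List.length_cons]
          simp only [hx, Bool.false_eq_true, if_false]
          have h1 : 1 + ((ys.takeWhile (· == y)).length + 1) = (1 + (ys.takeWhile (· == y)).length) + 1 := by omega
          rw [h1, List.replicate_succ]
          simp
        · simp only [List.takeWhile_cons, List.dropWhile_cons, hy, Bool.false_eq_true,
            if_false, List.length_nil]
          simp [List.replicate_succ]

-- ===== VERDICT (by name: the statement is the Claim_ definition above) =====
theorem combine_move_forawrd_spec : Claim_equal_combine_move_forawrd := by
  intro ls _
  show combine_move_forawrd ls = combine_move_forawrd_alt ls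
  have h : combine_move_forawrd ls = pvFin (ls.foldl pvStep ([], 0)) := rfl
  rw [h, pvA_eq ls [] 0, pvA_zero_alt]
  simp
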